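-- pv_equiv track=rewrite | github.com/Jonas-089/VisualizeRhymes | calculations.py | split_text_into_array
-- ===== SOURCE A (Python) =====
-- def split_text_into_array(text):
--
--     """
--     preparing text for GUI by turning it into a multidimensional word array at line breaks
--     :param text:
--     :return: word_array
--     """
--
--     line_array = []
--     word_array = []
--
--     text_array = text.split(" ")
--
--     for word_index in range(len(text_array)):
--
--         if text_array[word_index] != "\n":
--             line_array.append(text_array[word_index])
--         else:
--             word_array.append(line_array)
--             line_array = []
--             word_index += 1
--
--     word_array.append(line_array)
--
--     return word_array
-- ===== SOURCE B (Python) =====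
-- def split_text_into_array(text):
--     tokens = text.split(" ")
--     breaks = [i for i, t in enumerate(tokens) if t == "\n"]
--     word_array = []
--     start = 0
--     for b in breaks:
--         word_array.append(tokens[start:b])
--         start = b + 1
--     word_array.append(tokens[start:])
--     return word_array
-- ===== Notes on version B (the rewrite author's own statement) =====
-- stated objective: alternative
-- what changed: A builds the groups in one accumulating scan that flushes a running line buffer at every newline token; B instead splits once, collects the indices of the newline tokens, and cuts the token list into slices between consecutive break indices.
import Mathlib
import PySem

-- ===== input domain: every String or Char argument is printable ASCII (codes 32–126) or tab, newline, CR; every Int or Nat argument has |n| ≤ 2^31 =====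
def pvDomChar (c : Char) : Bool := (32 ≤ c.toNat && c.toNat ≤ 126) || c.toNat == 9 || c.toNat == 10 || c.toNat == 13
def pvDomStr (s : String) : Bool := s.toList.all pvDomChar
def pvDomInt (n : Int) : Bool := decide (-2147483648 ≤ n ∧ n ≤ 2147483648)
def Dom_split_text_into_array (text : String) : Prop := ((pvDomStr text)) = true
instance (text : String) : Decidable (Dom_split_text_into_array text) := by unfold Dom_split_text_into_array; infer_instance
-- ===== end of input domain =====

-- B replaces A's single accumulating scan with an index-then-slice pass (collect the
-- positions of "\n" tokens once, then cut the token list into the slices between them);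
-- alternative decomposition, same asymptotic cost.

-- ===== PORT A =====
def split_text_into_array (text : String) : List (List String) :=
  -- text.split(" "): sep is nonempty, so split? is always `some`; getD only reads it.
  let text_array := (PySem.Str.split? text " ").getD []
  -- 'for word_index in range(len(text_array))'; the 'word_index += 1' in the else
  -- branch is a no-op in Python (the loop variable is reassigned by range) and has no port.
  let st := (PySem.List.pyRange 0 (PySem.List.len text_array)).foldl
    (fun (st : List String × List (List String)) word_index =>
      let w := PySem.List.pyGetD text_array word_index ""
      if w ≠ "\n" then (st.1 ++ [w], st.2) else ([], st.2 ++ [st.1]))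
    ([], [])
  st.2 ++ [st.1]

-- ===== PORT B =====
def split_text_into_array_alt (text : String) : List (List String) :=
  let tokens := (PySem.Str.split? text " ").getD []
  let breaks := (PySem.List.enumerate tokens 0).filterMap
    (fun p => if p.2 = "\n" then some p.1 else none)
  let st := breaks.foldl
    (fun (st : Int × List (List String)) b =>
      (b + 1, st.2 ++ [PySem.List.slice tokens (some st.1) (some b)]))
    ((0 : Int), ([] : List (List String)))
  st.2 ++ [PySem.List.slice tokens (some st.1) none]

-- ===== PRECONDITION & SPEC =====
def Spec_split_text_into_array (text : String) (out : List (List String)) : Prop := out = split_text_into_array_alt text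
instance (text : String) (out : List (List String)) : Decidable (Spec_split_text_into_array text out) := by unfold Spec_split_text_into_array; infer_instance

-- ===== CLAIM (what is proved, stated in full; the proofs are below) =====
def Claim_equal_split_text_into_array : Prop := ∀ (text : String), Dom_split_text_into_array text → Spec_split_text_into_array text (split_text_into_array text)

-- ===== LEMMAS AND PROOFS =====

/-- A's loop step (identical to the lambda in `split_text_into_array`). -/
def pvFA (st : List String × List (List String)) (w : String) :
    List String × List (List String) :=
  if w ≠ "\n" then (st.1 ++ [w], st.2) else ([], st.2 ++ [st.1])

/-- B's loop step over `tokens` (identical to the lambda in `split_text_into_array_alt`). -/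
def pvFB (tokens : List String) (st : Int × List (List String)) (b : Int) :
    Int × List (List String) :=
  (b + 1, st.2 ++ [PySem.List.slice tokens (some st.1) (some b)])

/-- The common meaning: split a token list into groups at `"\n"` tokens. -/
def pvGroups : List String → List (List String)
  | [] => [[]]
  | w :: ws => if w = "\n" then [] :: pvGroups ws else (pvGroups ws).modifyHead (w :: ·)

/-- Positions (as Nats) of the `"\n"` tokens. -/
def pvBrk : List String → List Nat
  | [] => []
  | w :: ws => (if w = "\n" then [0] else []) ++ (pvBrk ws).map (· + 1)

/-- Recursive form of B's slicing loop. -/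
def pvRunR (ts : List String) : List Int → Int → List (List String)
  | [], s => [PySem.List.slice ts (some s) none]
  | b :: bs, s => PySem.List.slice ts (some s) (some b) :: pvRunR ts bs (b + 1)

-- A's loop computes pvGroups.
theorem pvA_loop (ts : List String) :
    ∀ (line : List String) (word : List (List String)),
      (ts.foldl pvFA (line, word)).2 ++ [(ts.foldl pvFA (line, word)).1]
      = word ++ (pvGroups ts).modifyHead (line ++ ·) := by
  induction ts with
  | nil => intro line word; simp [pvGroups]
  | cons w ws ih =>
    intro line word
    rw [List.foldl_cons]
    by_cases hw : w = "\n"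
    · rw [show pvFA (line, word) w = ([], word ++ [line]) from by simp [pvFA, hw]]
      rw [ih [] (word ++ [line])]
      rw [show pvGroups (w :: ws) = [] :: pvGroups ws from by simp [pvGroups, hw]]
      simp only [List.append_assoc]
      cases pvGroups ws <;> simp
    · rw [show pvFA (line, word) w = (line ++ [w], word) from by simp [pvFA, hw]]
      rw [ih (line ++ [w]) word]
      rw [show pvGroups (w :: ws) = (pvGroups ws).modifyHead (w :: ·) from by
        simp [pvGroups, hw]]
      congr 1
      cases pvGroups ws <;> simp

-- B's break-list comprehension computes pvBrk (shifted by the enumerate start).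
theorem pvB_breaks (ts : List String) :
    ∀ (s : Nat),
      (PySem.List.enumerate ts (s : Int)).filterMap
        (fun p => if p.2 = "\n" then some p.1 else none)
      = (pvBrk ts).map (fun n => ((s + n : Nat) : Int)) := by
  induction ts with
  | nil => intro s; simp [PySem.List.enumerate_nil, pvBrk]
  | cons w ws ih =>
    intro s
    rw [PySem.List.enumerate_cons,
      show ((s : Int) + 1) = ((s + 1 : Nat) : Int) from by push_cast; ring]
    by_cases hw : w = "\n"
    · rw [List.filterMap_cons_some (show _ = some (s : Int) from by simp [hw]), ih (s + 1)]
      simp only [pvBrk]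
      rw [if_pos hw]
      simp only [List.singleton_append, List.map_cons, List.map_map]
      exact List.cons_eq_cons.mpr
        ⟨by omega, List.map_congr_left fun n _ => by simp only [Function.comp_apply]; omega⟩
    · rw [List.filterMap_cons_none (by simp [hw]), ih (s + 1)]
      simp only [pvBrk]
      rw [if_neg hw]
      simp only [List.nil_append, List.map_map]
      exact List.map_congr_left fun n _ => by simp only [Function.comp_apply]; omega

-- B's foldl loop, finished with the final slice, is pvRunR.
theorem pvB_foldl (ts : List String) (bs : List Int) :
    ∀ (s : Int) (acc : List (List String)),
      (bs.foldl (pvFB ts) (s, acc)).2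
        ++ [PySem.List.slice ts (some ((bs.foldl (pvFB ts) (s, acc)).1)) none]
      = acc ++ pvRunR ts bs s := by
  induction bs with
  | nil => intro s acc; simp [pvRunR]
  | cons b bs ih =>
    intro s acc
    rw [List.foldl_cons,
      show pvFB ts (s, acc) b
        = (b + 1, acc ++ [PySem.List.slice ts (some s) (some b)]) from rfl]
    rw [ih (b + 1) (acc ++ [PySem.List.slice ts (some s) (some b)])]
    simp [pvRunR]

-- Prepending the token at position p extends the first slice by one element.
theorem pvRunR_shift (ts : List String) (w : String) (bs : List Int) (p : Nat)
    (hd : ts.drop p = w :: ts.drop (p + 1)) (hb : ∀ b ∈ bs, (p : Int) + 1 ≤ b) :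
    pvRunR ts bs ((p : Nat) : Int)
      = (pvRunR ts bs (((p + 1 : Nat)) : Int)).modifyHead (w :: ·) := by
  cases bs with
  | nil =>
    simp only [pvRunR, List.modifyHead_cons, PySem.List.slice_from_natCast]
    rw [hd]
  | cons b bs =>
    have hmb : (p : Int) + 1 ≤ b := hb b (List.mem_cons_self ..)
    obtain ⟨q, rfl, hq⟩ : ∃ q : Nat, b = (q : Int) ∧ p + 1 ≤ q :=
      ⟨b.toNat, by omega, by omega⟩
    simp only [pvRunR, List.modifyHead_cons]
    congr 1
    rw [PySem.List.slice_natCast, PySem.List.slice_natCast, hd,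
      show q - p = (q - (p + 1)) + 1 from by omega, List.take_succ_cons]

-- The sliced groups are pvGroups.
theorem pvRunR_groups (ts : List String) :
    ∀ (ws : List String) (p : Nat), ts.drop p = ws →
      pvRunR ts ((pvBrk ws).map (fun n => ((p + n : Nat) : Int))) ((p : Nat) : Int)
        = pvGroups ws := by
  intro ws
  induction ws with
  | nil => intro p hp; simp [pvBrk, pvRunR, pvGroups, PySem.List.slice_from_natCast, hp]
  | cons w ws ih =>
    intro p hp
    have hdrop : ts.drop (p + 1) = ws := by
      have h := congrArg List.tail hp
      simpa [List.tail_drop] using h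
    have hd : ts.drop p = w :: ts.drop (p + 1) := by rw [hp, hdrop]
    by_cases hw : w = "\n"
    · rw [show pvBrk (w :: ws) = 0 :: (pvBrk ws).map (· + 1) from by simp [pvBrk, hw],
        show pvGroups (w :: ws) = [] :: pvGroups ws from by simp [pvGroups, hw]]
      rw [show (0 :: (pvBrk ws).map (· + 1)).map (fun n => ((p + n : Nat) : Int))
            = ((p : Nat) : Int) :: (pvBrk ws).map (fun n => (((p + 1) + n : Nat) : Int)) from by
          simp only [List.map_cons, List.map_map]
          exact List.cons_eq_cons.mpr
            ⟨by omega,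
             List.map_congr_left fun n _ => by simp only [Function.comp_apply]; omega⟩]
      simp only [pvRunR]
      rw [show PySem.List.slice ts (some ((p : Nat) : Int)) (some ((p : Nat) : Int)) = []
            from by rw [PySem.List.slice_natCast]; simp]
      congr 1
      rw [show (((p : Nat) : Int) + 1) = (((p + 1 : Nat)) : Int) from by push_cast; ring]
      exact ih (p + 1) hdrop
    · rw [show (pvBrk (w :: ws)).map (fun n => ((p + n : Nat) : Int))
            = (pvBrk ws).map (fun n => (((p + 1) + n : Nat) : Int)) from by
          simp only [pvBrk]
          rw [if_neg hw]
          simp only [List.nil_append, List.map_map]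
          exact List.map_congr_left fun n _ => by simp only [Function.comp_apply]; omega]
      rw [show pvGroups (w :: ws) = (pvGroups ws).modifyHead (w :: ·) from by
        simp [pvGroups, hw]]
      rw [pvRunR_shift ts w _ p hd (fun b hb => by
        simp only [List.mem_map] at hb
        obtain ⟨a, -, rfl⟩ := hb
        omega)]
      rw [ih (p + 1) hdrop]

-- ===== VERDICT (by name: the statement is the Claim_ definition above) =====
theorem split_text_into_array_spec : Claim_equal_split_text_into_array := by
  intro text _
  unfold Spec_split_text_into_array split_text_into_array split_text_into_array_alt
  generalize (PySem.Str.split? text " ").getD [] = tokens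
  show ((PySem.List.pyRange 0 (PySem.List.len tokens)).foldl
        (fun st wi => pvFA st (PySem.List.pyGetD tokens wi "")) ([], [])).2
      ++ [((PySem.List.pyRange 0 (PySem.List.len tokens)).foldl
        (fun st wi => pvFA st (PySem.List.pyGetD tokens wi "")) ([], [])).1]
    = ((((PySem.List.enumerate tokens 0).filterMap
          (fun p => if p.2 = "\n" then some p.1 else none)).foldl
            (pvFB tokens) ((0 : Int), ([] : List (List String)))).2
        ++ [PySem.List.slice tokens
            (some ((((PySem.List.enumerate tokens 0).filterMap
              (fun p => if p.2 = "\n" then some p.1 else none)).foldl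
                (pvFB tokens) ((0 : Int), ([] : List (List String)))).1)) none])
  rw [PySem.List.foldl_pyRange_zero_pyGetD tokens "" pvFA
      (([], []) : List String × List (List String))]
  rw [pvA_loop tokens [] []]
  rw [show (0 : Int) = ((0 : Nat) : Int) from rfl]
  rw [pvB_breaks tokens 0]
  rw [pvB_foldl tokens _ (((0 : Nat)) : Int) []]
  rw [pvRunR_groups tokens tokens 0 (by simp)]
  simp only [List.nil_append]
  cases pvGroups tokens <;> simp
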